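-- pv_equiv track=rewrite | github.com/dmytro-kolisnyk/computational-physics | RandomWalks/src/PseudoRng.py | gaps_num
-- ===== SOURCE A (Python) =====
-- def gaps_num(seq, interval):
--     """Find gap lengths starting and ending in a given interval"""
--     i = 0
--     gaps = []
--     while i < len(seq):
--         while (i < len(seq)) and (not(interval[0] <= seq[i] <= interval[1])):
--             i += 1
--         i += 1
--         counter = 0
--         while (i < len(seq)) and (not(interval[0] <= seq[i] <= interval[1])):
--             i += 1
--             counter += 1
--         if(i < len(seq) - 1):
--             gaps.append(counter)
--     return gaps
-- ===== SOURCE B (Python) =====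
-- def gaps_num(seq, interval):
--     """Find gap lengths starting and ending in a given interval"""
--     lo, hi = interval[0], interval[1]
--     pos = [j for j, x in enumerate(seq) if lo <= x <= hi]
--     return [b - a - 1 for a, b in zip(pos, pos[1:]) if b < len(seq) - 1]
-- ===== Notes on version B (the rewrite author's own statement) =====
-- stated objective: simpler
-- what changed: Replaced A's three nested while-loops with mutable index/counter state by a single enumerate-filter pass collecting the in-interval positions followed by pairwise differences over consecutive positions (zip), keeping A's rule that a gap closing at the last index is dropped.
import Mathlib
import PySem

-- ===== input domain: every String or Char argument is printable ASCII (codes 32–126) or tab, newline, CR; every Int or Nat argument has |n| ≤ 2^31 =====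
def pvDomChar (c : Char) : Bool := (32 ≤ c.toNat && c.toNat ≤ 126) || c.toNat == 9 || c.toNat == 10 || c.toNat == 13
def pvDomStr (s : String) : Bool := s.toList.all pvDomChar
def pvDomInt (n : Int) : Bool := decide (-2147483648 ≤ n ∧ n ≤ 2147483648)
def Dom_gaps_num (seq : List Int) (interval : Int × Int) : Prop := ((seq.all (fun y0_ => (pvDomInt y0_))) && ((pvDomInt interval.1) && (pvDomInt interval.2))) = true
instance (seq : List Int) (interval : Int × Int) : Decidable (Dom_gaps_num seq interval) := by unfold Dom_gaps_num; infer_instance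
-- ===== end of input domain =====

-- B replaces A's nested two-pointer skip/count while-loops by collect-the-in-interval
-- positions once, then pairwise differences over consecutive positions (objective: simpler).

-- ===== PORT A =====
-- first inner while: advance i past out-of-interval elements
def pvSkip (seq : List Int) (lo hi : Int) (i : Nat) : Nat :=
  if h : i < seq.length then
    if ¬ (lo ≤ seq[i] ∧ seq[i] ≤ hi) then pvSkip seq lo hi (i + 1) else i
  else i
termination_by seq.length - i

-- second inner while: advance i, incrementing counter c
def pvCount (seq : List Int) (lo hi : Int) (i c : Nat) : Nat × Nat :=
  if h : i < seq.length then
    if ¬ (lo ≤ seq[i] ∧ seq[i] ≤ hi) then pvCount seq lo hi (i + 1) (c + 1) else (i, c)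
  else (i, c)
termination_by seq.length - i

theorem pvSkip_ge (seq : List Int) (lo hi : Int) (i : Nat) : i ≤ pvSkip seq lo hi i := by
  fun_induction pvSkip with
  | case1 i h hin ih => omega
  | case2 => omega
  | case3 => omega

theorem pvCount_fst_ge (seq : List Int) (lo hi : Int) (i c : Nat) :
    i ≤ (pvCount seq lo hi i c).1 := by
  fun_induction pvCount with
  | case1 i c h hin ih => omega
  | case2 => simp
  | case3 => simp

-- outer while
def pvOuter (seq : List Int) (lo hi : Int) (i : Nat) (gaps : List Int) : List Int :=
  if _h : i < seq.length then
    pvOuter seq lo hi (pvCount seq lo hi (pvSkip seq lo hi i + 1) 0).1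
      (if (pvCount seq lo hi (pvSkip seq lo hi i + 1) 0).1 + 1 < seq.length
       then gaps ++ [((pvCount seq lo hi (pvSkip seq lo hi i + 1) 0).2 : Int)] else gaps)
  else gaps
termination_by seq.length - i
decreasing_by
  have h1 := pvSkip_ge seq lo hi i
  have h2 := pvCount_fst_ge seq lo hi (pvSkip seq lo hi i + 1) 0
  omega

def gaps_num (seq : List Int) (interval : Int × Int) : List Int :=
  pvOuter seq interval.1 interval.2 0 []

-- ===== PORT B =====
def gaps_num_alt (seq : List Int) (interval : Int × Int) : List Int :=
  let pos : List Int :=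
    ((PySem.List.enumerate seq).filter
      (fun p => decide (interval.1 ≤ p.2 ∧ p.2 ≤ interval.2))).map (fun p => p.1)
  ((pos.zip (pos.drop 1)).filter
      (fun ab => decide (ab.2 < (seq.length : Int) - 1))).map (fun ab => ab.2 - ab.1 - 1)

-- ===== PRECONDITION & SPEC =====
def Spec_gaps_num (seq : List Int) (interval : Int × Int) (out : List Int) : Prop := out = gaps_num_alt seq interval
instance (seq : List Int) (interval : Int × Int) (out : List Int) : Decidable (Spec_gaps_num seq interval out) := by unfold Spec_gaps_num; infer_instance

-- ===== CLAIM (what is proved, stated in full; the proofs are below) =====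
def Claim_equal_gaps_num : Prop := ∀ (seq : List Int) (interval : Int × Int), Dom_gaps_num seq interval → Spec_gaps_num seq interval (gaps_num seq interval)

-- ===== LEMMAS AND PROOFS =====

-- list of in-interval indices ≥ i, in order
def posF (seq : List Int) (lo hi : Int) (i : Nat) : List Nat :=
  if h : i < seq.length then
    (if lo ≤ seq[i] ∧ seq[i] ≤ hi then [i] else []) ++ posF seq lo hi (i + 1)
  else []
termination_by seq.length - i

-- common shape: the gaps determined by the position list
def gapsOf (n : Nat) : List Nat → List Int
  | p :: q :: rest => (if q + 1 < n then [(q : Int) - p - 1] else []) ++ gapsOf n (q :: rest)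
  | _ => []

theorem posF_stop (seq : List Int) (lo hi : Int) (i : Nat) (h : seq.length ≤ i) :
    posF seq lo hi i = [] := by
  unfold posF; simp [Nat.not_lt.mpr h]

theorem posF_in (seq : List Int) (lo hi : Int) (i : Nat) (h : i < seq.length)
    (hin : lo ≤ seq[i] ∧ seq[i] ≤ hi) :
    posF seq lo hi i = i :: posF seq lo hi (i + 1) := by
  conv_lhs => rw [posF]
  simp [h, hin]

theorem posF_out (seq : List Int) (lo hi : Int) (i : Nat) (h : i < seq.length)
    (hin : ¬ (lo ≤ seq[i] ∧ seq[i] ≤ hi)) :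
    posF seq lo hi i = posF seq lo hi (i + 1) := by
  conv_lhs => rw [posF]
  simp [h, hin]

theorem posF_mem (seq : List Int) (lo hi : Int) (i j : Nat) (hj : j ∈ posF seq lo hi i) :
    i ≤ j ∧ j < seq.length := by
  fun_induction posF with
  | case1 i h ih =>
    simp only [List.mem_append] at hj
    rcases hj with hj | hj
    · split at hj
      · simp at hj; omega
      · simp at hj
    · have := ih hj; omega
  | case2 => simp at hj

theorem pvSkip_eq (seq : List Int) (lo hi : Int) (i : Nat) (hle : i ≤ seq.length) :
    pvSkip seq lo hi i = (posF seq lo hi i).headD seq.length := by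
  fun_induction pvSkip with
  | case1 i h hin ih =>
    rw [ih (by omega), posF_out seq lo hi i h hin]
  | case2 i h hin =>
    simp at hin
    rw [posF_in seq lo hi i h hin]; rfl
  | case3 i h =>
    have : i = seq.length := by omega
    subst this
    rw [posF_stop seq lo hi seq.length (by omega)]; rfl

theorem posF_head_ge (seq : List Int) (lo hi : Int) (i : Nat) (hle : i ≤ seq.length) :
    i ≤ (posF seq lo hi i).headD seq.length := by
  cases hp : posF seq lo hi i with
  | nil => simpa using hle
  | cons a t =>
    have := posF_mem seq lo hi i a (by simp [hp])
    simpa using this.1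

theorem pvCount_eq (seq : List Int) (lo hi : Int) (i c : Nat) (hle : i ≤ seq.length) :
    pvCount seq lo hi i c =
      ((posF seq lo hi i).headD seq.length,
       c + ((posF seq lo hi i).headD seq.length - i)) := by
  fun_induction pvCount with
  | case1 i c h hin ih =>
    rw [ih (by omega), posF_out seq lo hi i h hin]
    have hge := posF_head_ge seq lo hi (i + 1) (by omega)
    simp only [Prod.mk.injEq, true_and]
    omega
  | case2 i c h hin =>
    simp at hin
    rw [posF_in seq lo hi i h hin]
    simp
  | case3 i c h =>
    have : i = seq.length := by omega
    subst this
    rw [posF_stop seq lo hi seq.length (by omega)]; simp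

theorem posF_cons_self (seq : List Int) (lo hi : Int) (q : Nat) (rest : List Nat) :
    ∀ n i, seq.length - i = n → posF seq lo hi i = q :: rest →
      posF seq lo hi q = q :: rest := by
  intro n
  induction n with
  | zero =>
    intro i hn h
    rw [posF_stop seq lo hi i (by omega)] at h; cases h
  | succ n ih =>
    intro i hn h
    by_cases hlt : i < seq.length
    · by_cases hin : lo ≤ seq[i] ∧ seq[i] ≤ hi
      · rw [posF_in seq lo hi i hlt hin] at h
        injection h with h1 h2
        subst h1
        rw [posF_in seq lo hi i hlt hin, h2]
      · rw [posF_out seq lo hi i hlt hin] at h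
        exact ih (i + 1) (by omega) h
    · rw [posF_stop seq lo hi i (by omega)] at h; cases h

theorem posF_tail (seq : List Int) (lo hi : Int) (q : Nat) (rest : List Nat)
    (h : posF seq lo hi q = q :: rest) : posF seq lo hi (q + 1) = rest := by
  by_cases hlt : q < seq.length
  · by_cases hin : lo ≤ seq[q] ∧ seq[q] ≤ hi
    · rw [posF_in seq lo hi q hlt hin] at h
      injection h
    · rw [posF_out seq lo hi q hlt hin] at h
      have := posF_mem seq lo hi (q + 1) q (by rw [h]; simp)
      omega
  · rw [posF_stop seq lo hi q (by omega)] at h; cases h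

theorem pvOuter_step (seq : List Int) (lo hi : Int) (i : Nat) (gaps : List Int)
    (h : i < seq.length) :
    pvOuter seq lo hi i gaps = pvOuter seq lo hi (pvCount seq lo hi (pvSkip seq lo hi i + 1) 0).1
      (if (pvCount seq lo hi (pvSkip seq lo hi i + 1) 0).1 + 1 < seq.length
       then gaps ++ [((pvCount seq lo hi (pvSkip seq lo hi i + 1) 0).2 : Int)] else gaps) := by
  conv_lhs => rw [pvOuter]
  rw [dif_pos h]

theorem pvOuter_stop (seq : List Int) (lo hi : Int) (i : Nat) (gaps : List Int)
    (h : ¬ i < seq.length) : pvOuter seq lo hi i gaps = gaps := by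
  conv_lhs => rw [pvOuter]
  rw [dif_neg h]

theorem pvOuter_eq (seq : List Int) (lo hi : Int) :
    ∀ (n i : Nat) (gaps : List Int), seq.length - i ≤ n →
      pvOuter seq lo hi i gaps = gaps ++ gapsOf seq.length (posF seq lo hi i) := by
  intro n
  induction n with
  | zero =>
    intro i gaps hn
    rw [pvOuter_stop seq lo hi i gaps (by omega),
      posF_stop seq lo hi i (by omega)]
    simp [gapsOf]
  | succ n ihn =>
    intro i gaps hn
    by_cases h : i < seq.length
    · have hskip := pvSkip_ge seq lo hi i
      have hcnt := pvCount_fst_ge seq lo hi (pvSkip seq lo hi i + 1) 0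
      rw [pvOuter_step seq lo hi i gaps h,
        ihn (pvCount seq lo hi (pvSkip seq lo hi i + 1) 0).1 _ (by omega)]
      cases hp : posF seq lo hi i with
      | nil =>
        have hs : pvSkip seq lo hi i = seq.length := by
          rw [pvSkip_eq seq lo hi i (by omega), hp]; rfl
        have hc : pvCount seq lo hi (seq.length + 1) 0 = (seq.length + 1, 0) := by
          conv_lhs => rw [pvCount]
          rw [dif_neg (by omega)]
        rw [hs, hc]
        rw [if_neg (by omega), posF_stop seq lo hi (seq.length + 1) (by omega)]
      | cons p rest =>
        have hp' : posF seq lo hi p = p :: rest :=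
          posF_cons_self seq lo hi p rest (seq.length - i) i rfl hp
        have hs : pvSkip seq lo hi i = p := by
          rw [pvSkip_eq seq lo hi i (by omega), hp]; rfl
        have hrest : posF seq lo hi (p + 1) = rest := posF_tail seq lo hi p rest hp'
        have hple : p + 1 ≤ seq.length := by
          have := posF_mem seq lo hi i p (by rw [hp]; simp); omega
        have hc := pvCount_eq seq lo hi (p + 1) 0 hple
        rw [hrest] at hc
        rw [hs, hc]
        cases hr : rest with
        | nil =>
          subst hr
          simp only [List.headD]
          have hfalse : ¬ (seq.length + 1 < seq.length) := by omega
          rw [if_neg hfalse, posF_stop seq lo hi seq.length (by omega)]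
          simp [gapsOf]
        | cons q rest' =>
          subst hr
          have hq : q + 1 ≤ seq.length ∧ p + 1 ≤ q := by
            have := posF_mem seq lo hi (p + 1) q (by rw [hrest]; simp)
            omega
          simp only [List.headD]
          have hposq : posF seq lo hi q = q :: rest' :=
            posF_cons_self seq lo hi q rest' (seq.length - (p + 1)) (p + 1) rfl hrest
          rw [hposq]
          have hcast : ((0 + (q - (p + 1)) : Nat) : Int) = (q : Int) - (p : Int) - 1 := by
            omega
          by_cases hlast : q + 1 < seq.length
          · rw [if_pos hlast, hcast,
              show gapsOf seq.length (p :: q :: rest') =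
                ((q : Int) - p - 1) :: gapsOf seq.length (q :: rest') from by
                  simp [gapsOf, hlast]]
            simp
          · rw [if_neg hlast,
              show gapsOf seq.length (p :: q :: rest') = gapsOf seq.length (q :: rest') from by
                simp [gapsOf, hlast]]
    · rw [pvOuter_stop seq lo hi i gaps h, posF_stop seq lo hi i (by omega)]
      simp [gapsOf]

theorem posF_shift (seq : List Int) (x lo hi : Int) :
    ∀ n i, seq.length - i = n →
      posF (x :: seq) lo hi (i + 1) = (posF seq lo hi i).map (· + 1) := by
  intro n
  induction n with
  | zero =>
    intro i hn
    rw [posF_stop seq lo hi i (by omega), posF_stop (x :: seq) lo hi (i + 1) (by simp; omega)]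
    simp
  | succ n ih =>
    intro i hn
    have hlt : i < seq.length := by omega
    have hlt' : i + 1 < (x :: seq).length := by simp; omega
    have hget : (x :: seq)[i + 1]'hlt' = seq[i]'hlt := by simp
    by_cases hin : lo ≤ seq[i] ∧ seq[i] ≤ hi
    · rw [posF_in seq lo hi i hlt hin,
        posF_in (x :: seq) lo hi (i + 1) hlt' (by rw [hget]; exact hin),
        ih (i + 1) (by omega)]
      simp
    · rw [posF_out seq lo hi i hlt hin,
        posF_out (x :: seq) lo hi (i + 1) hlt' (by rw [hget]; exact hin),
        ih (i + 1) (by omega)]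

-- B side: the position list of B is posF 0 (cast to Int)
theorem enum_filter_eq (seq : List Int) (lo hi : Int) :
    ∀ s : Int,
    ((PySem.List.enumerate seq s).filter (fun p => decide (lo ≤ p.2 ∧ p.2 ≤ hi))).map
        (fun p => p.1)
      = (posF seq lo hi 0).map (fun j => Int.ofNat j + s) := by
  induction seq with
  | nil => intro s; simp [PySem.List.enumerate_nil, posF]
  | cons x xs ih =>
    intro s
    rw [PySem.List.enumerate_cons]
    have h0 : posF (x :: xs) lo hi 0 =
        (if lo ≤ x ∧ x ≤ hi then [0] else []) ++ (posF xs lo hi 0).map (· + 1) := by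
      have hstep : posF (x :: xs) lo hi 0 = (if lo ≤ x ∧ x ≤ hi then [0] else [])
          ++ posF (x :: xs) lo hi 1 := by
        conv_lhs => rw [posF]
        simp
      rw [hstep, posF_shift xs x lo hi xs.length 0 rfl]
    rw [h0]
    have htail : ((PySem.List.enumerate xs (s + 1)).filter
          (fun p => decide (lo ≤ p.2 ∧ p.2 ≤ hi))).map (fun p => p.1)
        = ((posF xs lo hi 0).map (fun j => j + 1)).map (fun j => Int.ofNat j + s) := by
      rw [ih (s + 1), List.map_map]
      refine List.map_congr_left ?_
      intro j hj
      simp [Function.comp]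
      ring
    rw [List.filter_cons]
    by_cases hin : lo ≤ x ∧ x ≤ hi
    · rw [if_pos (by simpa using hin), if_pos hin]
      simp only [List.map_cons, List.map_append, htail]
      simp
    · rw [if_neg (by simpa using hin), if_neg hin]
      simpa using htail

theorem zip_gaps_eq (n : Nat) (ps : List Nat) :
    ((((ps.map (fun j => Int.ofNat j)).zip ((ps.map (fun j => Int.ofNat j)).drop 1)).filter
        (fun ab => decide (ab.2 < (n : Int) - 1))).map (fun ab => ab.2 - ab.1 - 1))
      = gapsOf n ps := by
  induction ps with
  | nil => simp [gapsOf]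
  | cons p tl ih =>
    cases tl with
    | nil => simp [gapsOf]
    | cons q rest =>
      have hzip : ((p :: q :: rest).map (fun j => Int.ofNat j)).zip
            (((p :: q :: rest).map (fun j => Int.ofNat j)).drop 1)
          = (Int.ofNat p, Int.ofNat q) ::
            (((q :: rest).map (fun j => Int.ofNat j)).zip
              (((q :: rest).map (fun j => Int.ofNat j)).drop 1)) := rfl
      rw [hzip, List.filter_cons]
      by_cases hq : q + 1 < n
      · rw [if_pos (by simp only [decide_eq_true_eq, Int.ofNat_eq_natCast]; omega), List.map_cons, ih]
        rw [show gapsOf n (p :: q :: rest) = ((q : Int) - p - 1) :: gapsOf n (q :: rest) from by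
          simp [gapsOf, hq]]
        simp
      · rw [if_neg (by simp only [decide_eq_true_eq, Int.ofNat_eq_natCast]; omega), ih]
        rw [show gapsOf n (p :: q :: rest) = gapsOf n (q :: rest) from by simp [gapsOf, hq]]

-- ===== VERDICT (by name: the statement is the Claim_ definition above) =====
theorem gaps_num_spec : Claim_equal_gaps_num := by
  intro seq interval _
  unfold Spec_gaps_num gaps_num gaps_num_alt
  rw [pvOuter_eq seq interval.1 interval.2 seq.length 0 [] (by omega)]
  have he := enum_filter_eq seq interval.1 interval.2 0
  simp only [add_zero] at he
  rw [show PySem.List.enumerate seq = PySem.List.enumerate seq 0 from rfl]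
  simp only [he, zip_gaps_eq]
  simp
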